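-- pv_equiv track=rewrite | github.com/posl/comment_recommendation | script/mod_gen/5_time/en/241_C/3.py | check_for_consecutive_black_squares
-- ===== SOURCE A (Python) =====
-- def check_for_consecutive_black_squares(grid):
--     for i in range(len(grid)):
--         for j in range(len(grid)):
--             if grid[i][j] == '.':
--                 grid[i][j] = 1
--             else:
--                 grid[i][j] = 0
--     for i in range(len(grid)):
--         for j in range(len(grid)):
--             if i + 5 < len(grid) and j + 5 < len(grid):
--                 if grid[i][j] + grid[i + 1][j + 1] + grid[i + 2][j + 2] + grid[i + 3][j + 3] + grid[i + 4][j + 4] + grid[i + 5][j + 5] == 6: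
--                     return True
--             if i + 5 < len(grid):
--                 if grid[i][j] + grid[i + 1][j] + grid[i + 2][j] + grid[i + 3][j] + grid[i + 4][j] + grid[i + 5][j] == 6:
--                     return True
--             if j + 5 < len(grid):
--                 if grid[i][j] + grid[i][j + 1] + grid[i][j + 2] + grid[i][j + 3] + grid[i][j + 4] + grid[i][j + 5] == 6:
--                     return True
--     return False
-- ===== SOURCE B (Python) =====
-- def check_for_consecutive_black_squares(grid):
--     n = len(grid)
--     # same in-place conversion as the original (observable side effect)
--     for i in range(n):
--         for j in range(n):
--             grid[i][j] = 1 if grid[i][j] == '.' else 0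
--     # rows: running streak counters
--     for i in range(n):
--         run = 0
--         for j in range(n):
--             run = run + 1 if grid[i][j] else 0
--             if run == 6:
--                 return True
--     # columns
--     for j in range(n):
--         run = 0
--         for i in range(n):
--             run = run + 1 if grid[i][j] else 0
--             if run == 6:
--                 return True
--     # down-right diagonals starting on the top row
--     for s in range(n):
--         run = 0
--         for k in range(n - s):
--             run = run + 1 if grid[k][s + k] else 0
--             if run == 6:
--                 return True
--     # down-right diagonals starting on the left column (below the main one)
--     for s in range(1, n):
--         run = 0
--         for k in range(n - s):
--             run = run + 1 if grid[s + k][k] else 0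
--             if run == 6:
--                 return True
--     return False
-- ===== Notes on version B (the rewrite author's own statement) =====
-- stated objective: faster
-- what changed: Replaces the fixed six-term window sums (18 grid reads per cell, three guarded checks per position) with single-pass run-length counters along each row, each column and each down-right diagonal, returning as soon as a streak reaches 6; the in-place '.'->1/0 conversion is kept.
import Mathlib
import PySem

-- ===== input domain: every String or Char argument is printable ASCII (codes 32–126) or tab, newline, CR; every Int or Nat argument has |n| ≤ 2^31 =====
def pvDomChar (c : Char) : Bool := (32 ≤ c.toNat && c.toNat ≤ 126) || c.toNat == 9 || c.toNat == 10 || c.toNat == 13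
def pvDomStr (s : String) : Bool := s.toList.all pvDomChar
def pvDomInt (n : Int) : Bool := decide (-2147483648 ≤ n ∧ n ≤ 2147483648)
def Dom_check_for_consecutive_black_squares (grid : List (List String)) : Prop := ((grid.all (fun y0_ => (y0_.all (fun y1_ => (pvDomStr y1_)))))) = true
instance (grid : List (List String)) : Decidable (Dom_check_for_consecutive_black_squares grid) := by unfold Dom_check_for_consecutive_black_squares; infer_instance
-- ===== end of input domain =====

-- ===== PORT A =====
-- B replaces A's three fixed six-term window sums per position with single-pass streak
-- counters per row/column/down-right diagonal (same return value; in Python both A and B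
-- perform the identical in-place '.'->1/0 mutation of grid, which is kept, not proved).
-- PORT NOTE (both ports): Python's phase-1 loop overwrites grid[i][j] (j < len(grid)) with
-- 1/0 in place; phase 2 only ever reads row/column indices < len(grid), so the ports model
-- the converted grid as grid.map (row.map pvToCell) — converting the never-read columns
-- ≥ len(grid) too changes no value read.  Under Pre_ every access is in range, so the
-- 0/[] defaults of pvCell are never read.
def pvToCell (s : String) : Int := if s == "." then 1 else 0

def pvGrid (grid : List (List String)) : List (List Int) :=
  grid.map (fun row => row.map pvToCell)

def pvCell (g : List (List Int)) (i j : Nat) : Int := (g.getD i []).getD j 0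

def check_for_consecutive_black_squares (grid : List (List String)) : Bool :=
  (List.range grid.length).any (fun i => (List.range grid.length).any (fun j =>
    (decide (i + 5 < grid.length) && decide (j + 5 < grid.length) &&
      decide (pvCell (pvGrid grid) i j + pvCell (pvGrid grid) (i+1) (j+1) + pvCell (pvGrid grid) (i+2) (j+2) +
              pvCell (pvGrid grid) (i+3) (j+3) + pvCell (pvGrid grid) (i+4) (j+4) + pvCell (pvGrid grid) (i+5) (j+5) = 6)) ||
    (decide (i + 5 < grid.length) &&
      decide (pvCell (pvGrid grid) i j + pvCell (pvGrid grid) (i+1) j + pvCell (pvGrid grid) (i+2) j +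
              pvCell (pvGrid grid) (i+3) j + pvCell (pvGrid grid) (i+4) j + pvCell (pvGrid grid) (i+5) j = 6)) ||
    (decide (j + 5 < grid.length) &&
      decide (pvCell (pvGrid grid) i j + pvCell (pvGrid grid) i (j+1) + pvCell (pvGrid grid) i (j+2) +
              pvCell (pvGrid grid) i (j+3) + pvCell (pvGrid grid) i (j+4) + pvCell (pvGrid grid) i (j+5) = 6))))

-- ===== PORT B =====
-- 'run = run + 1 if cell else 0; if run == 6: return True' over one line of indices
def pvRunScan (f : Nat → Bool) (run : Int) : List Nat → Bool
  | [] => false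
  | j :: js =>
    let run' := if f j then run + 1 else 0
    if run' == 6 then true else pvRunScan f run' js

def check_for_consecutive_black_squares_alt (grid : List (List String)) : Bool :=
  ((List.range grid.length).any (fun i => pvRunScan (fun j => decide (pvCell (pvGrid grid) i j ≠ 0)) 0 (List.range grid.length))) ||
  ((List.range grid.length).any (fun j => pvRunScan (fun i => decide (pvCell (pvGrid grid) i j ≠ 0)) 0 (List.range grid.length))) ||
  ((List.range grid.length).any (fun s => pvRunScan (fun k => decide (pvCell (pvGrid grid) k (s+k) ≠ 0)) 0 (List.range (grid.length - s)))) ||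
  ((List.range' 1 (grid.length - 1)).any (fun s => pvRunScan (fun k => decide (pvCell (pvGrid grid) (s+k) k ≠ 0)) 0 (List.range (grid.length - s))))

-- ===== PRECONDITION & SPEC =====
-- Pre_ excludes exactly the grids on which Python A raises IndexError: phase 1 indexes
-- grid[i][j] for all i, j < len(grid), so every row must have at least len(grid) entries.
def Pre_check_for_consecutive_black_squares (grid : List (List String)) : Prop :=
  ∀ row ∈ grid, grid.length ≤ row.length
instance (grid : List (List String)) : Decidable (Pre_check_for_consecutive_black_squares grid) := by
  unfold Pre_check_for_consecutive_black_squares; infer_instance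

def pvWitness_check_for_consecutive_black_squares : List (List String) :=
  [[".", "#"], ["#", "."]]

def Spec_check_for_consecutive_black_squares (grid : List (List String)) (out : Bool) : Prop := out = check_for_consecutive_black_squares_alt grid
instance (grid : List (List String)) (out : Bool) : Decidable (Spec_check_for_consecutive_black_squares grid out) := by unfold Spec_check_for_consecutive_black_squares; infer_instance

-- ===== CLAIM (what is proved, stated in full; the proofs are below) =====
def Claim_equal_check_for_consecutive_black_squares : Prop := ∀ (grid : List (List String)), Dom_check_for_consecutive_black_squares grid → Pre_check_for_consecutive_black_squares grid → Spec_check_for_consecutive_black_squares grid (check_for_consecutive_black_squares grid)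

-- ===== LEMMAS AND PROOFS =====

lemma pvCell01 (grid : List (List String)) (i j : Nat) :
    pvCell (pvGrid grid) i j = 0 ∨ pvCell (pvGrid grid) i j = 1 := by
  unfold pvCell pvGrid
  have hrow : ∀ x ∈ (grid.map (fun row => row.map pvToCell)).getD i [], x = 0 ∨ x = 1 := by
    intro x hx
    by_cases h : i < (grid.map (fun row => row.map pvToCell)).length
    · rw [List.getD_eq_getElem _ _ h] at hx
      simp only [List.getElem_map, List.mem_map] at hx
      obtain ⟨s, _, rfl⟩ := hx
      unfold pvToCell; split <;> simp
    · rw [List.getD_eq_default _ _ (Nat.le_of_not_lt h)] at hx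
      simp at hx
  by_cases h : j < ((grid.map (fun row => row.map pvToCell)).getD i []).length
  · rw [List.getD_eq_getElem _ _ h]
    exact hrow _ (List.getElem_mem h)
  · rw [List.getD_eq_default _ _ (Nat.le_of_not_lt h)]; left; rfl

lemma pvRunScan_iff (f : Nat → Bool) :
    ∀ (m a : Nat) (r : Int), 0 ≤ r → r < 6 →
      (pvRunScan f r (List.range' a m) = true ↔
        ∃ t, t < m ∧ (5 : Int) - t ≤ r ∧ ∀ k, k ≤ t → t ≤ k + 5 → f (a + k) = true) := by
  intro m
  induction m with
  | zero => intro a r h0 h6; simp [pvRunScan]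
  | succ m ih =>
    intro a r h0 h6
    rw [List.range'_succ]
    by_cases hfa : f a = true
    · by_cases hr5 : r = 5
      · subst hr5
        simp only [pvRunScan, hfa, if_true]
        rw [if_pos (by norm_num : (((5:Int) + 1) == 6) = true)]
        simp only [true_iff]
        refine ⟨0, by omega, by omega, ?_⟩
        intro k hk _
        interval_cases k
        simpa using hfa
      · have h1 : ¬ ((r + 1 : Int) == 6) = true := by
          simp; omega
        simp only [pvRunScan, hfa, if_true, h1, Bool.false_eq_true, if_false]
        rw [ih (a+1) (r+1) (by omega) (by omega)]
        constructor
        · rintro ⟨t, ht, htr, hw⟩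
          refine ⟨t + 1, by omega, by omega, ?_⟩
          intro k hk hk5
          cases k with
          | zero => simpa using hfa
          | succ k' =>
            have := hw k' (by omega) (by omega)
            have e : a + (k' + 1) = a + 1 + k' := by omega
            rw [e]; exact this
        · rintro ⟨t, ht, htr, hw⟩
          cases t with
          | zero => push_cast at htr; omega
          | succ t' =>
            refine ⟨t', by omega, by omega, ?_⟩
            intro k hk hk5
            have := hw (k+1) (by omega) (by omega)
            have e : a + 1 + k = a + (k + 1) := by omega
            rw [e]; exact this
    · have hfa' : f a = false := by simpa using hfa
      simp only [pvRunScan, hfa', Bool.false_eq_true, if_false]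
      norm_num
      rw [ih (a+1) 0 (by omega) (by omega)]
      constructor
      · rintro ⟨t, ht, htr, hw⟩
        refine ⟨t + 1, by omega, by omega, ?_⟩
        intro k hk hk5
        cases k with
        | zero =>
          exfalso
          omega
        | succ k' =>
          have := hw k' (by omega) (by omega)
          have e : a + (k' + 1) = a + 1 + k' := by omega
          rw [e]; exact this
      · rintro ⟨t, ht, htr, hw⟩
        cases t with
        | zero =>
          exfalso
          have := hw 0 (by omega) (by omega)
          simp [hfa'] at this
        | succ t' =>
          by_cases h5 : t' + 1 ≤ 5
          · exfalso
            have := hw 0 (by omega) (by omega)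
            simp [hfa'] at this
          · refine ⟨t', by omega, by omega, ?_⟩
            intro k hk hk5
            have := hw (k+1) (by omega) (by omega)
            have e : a + 1 + k = a + (k + 1) := by omega
            rw [e]; exact this

lemma pvRunScan_window (f : Nat → Bool) (m : Nat) :
    pvRunScan f 0 (List.range m) = true ↔
      ∃ j, j + 5 < m ∧ ∀ k, k < 6 → f (j + k) = true := by
  rw [List.range_eq_range', pvRunScan_iff f m 0 0 (by omega) (by omega)]
  constructor
  · rintro ⟨t, ht, htr, hw⟩
    have h5 : 5 ≤ t := by omega
    refine ⟨t - 5, by omega, ?_⟩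
    intro k hk
    have := hw (t - 5 + k) (by omega) (by omega)
    simpa using this
  · rintro ⟨j, hj, hw⟩
    refine ⟨j + 5, by omega, by omega, ?_⟩
    intro k hk hk5
    have := hw (k - j) (by omega)
    have e : 0 + k = j + (k - j) := by omega
    rw [e]; exact this

lemma main_abstract (n : Nat) (c : Nat → Nat → Int) (hc : ∀ i j, c i j = 0 ∨ c i j = 1) :
    (∃ i < n, ∃ j < n,
       ((i+5 < n ∧ j+5 < n) ∧
          c i j + c (i+1) (j+1) + c (i+2) (j+2) + c (i+3) (j+3) + c (i+4) (j+4) + c (i+5) (j+5) = 6 ∨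
        i+5 < n ∧
          c i j + c (i+1) j + c (i+2) j + c (i+3) j + c (i+4) j + c (i+5) j = 6) ∨
        j+5 < n ∧
          c i j + c i (j+1) + c i (j+2) + c i (j+3) + c i (j+4) + c i (j+5) = 6)
    ↔ ((((∃ i < n, ∃ j, j+5 < n ∧ ∀ k < 6, c i (j+k) ≠ 0) ∨
         (∃ j < n, ∃ i, i+5 < n ∧ ∀ k < 6, c (i+k) j ≠ 0)) ∨
         (∃ s < n, ∃ t, t+5 < n - s ∧ ∀ k < 6, c (t+k) (s+(t+k)) ≠ 0)) ∨
         (∃ s, (1 ≤ s ∧ s < 1 + (n-1)) ∧ ∃ t, t+5 < n - s ∧ ∀ k < 6, c (s+(t+k)) (t+k) ≠ 0)) := by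
  have hsum : ∀ x0 x1 x2 x3 x4 x5 : Int, (x0=0∨x0=1) → (x1=0∨x1=1) → (x2=0∨x2=1) →
      (x3=0∨x3=1) → (x4=0∨x4=1) → (x5=0∨x5=1) →
      (x0+x1+x2+x3+x4+x5 = 6 ↔ (x0 ≠ 0 ∧ x1 ≠ 0 ∧ x2 ≠ 0 ∧ x3 ≠ 0 ∧ x4 ≠ 0 ∧ x5 ≠ 0)) := by
    intros; omega
  constructor
  · rintro ⟨i, hi, j, hj, (⟨⟨hi5, hj5⟩, hs⟩ | ⟨hi5, hs⟩) | ⟨hj5, hs⟩⟩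
    · -- diagonal window found by A
      obtain ⟨c0, c1, c2, c3, c4, c5⟩ :=
        (hsum _ _ _ _ _ _ (hc _ _) (hc _ _) (hc _ _) (hc _ _) (hc _ _) (hc _ _)).mp hs
      by_cases hij : i ≤ j
      · refine Or.inl (Or.inr ⟨j - i, by omega, i, by omega, ?_⟩)
        intro k hk
        have e : (j - i) + (i + k) = j + k := by omega
        rw [e]
        interval_cases k
        · exact c0
        · exact c1
        · exact c2
        · exact c3
        · exact c4
        · exact c5
      · refine Or.inr ⟨i - j, ⟨by omega, by omega⟩, j, by omega, ?_⟩
        intro k hk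
        have e : (i - j) + (j + k) = i + k := by omega
        rw [e]
        interval_cases k
        · exact c0
        · exact c1
        · exact c2
        · exact c3
        · exact c4
        · exact c5
    · -- vertical window found by A
      obtain ⟨c0, c1, c2, c3, c4, c5⟩ :=
        (hsum _ _ _ _ _ _ (hc _ _) (hc _ _) (hc _ _) (hc _ _) (hc _ _) (hc _ _)).mp hs
      refine Or.inl (Or.inl (Or.inr ⟨j, hj, i, hi5, ?_⟩))
      intro k hk
      interval_cases k
      · exact c0
      · exact c1
      · exact c2
      · exact c3
      · exact c4
      · exact c5
    · -- horizontal window found by A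
      obtain ⟨c0, c1, c2, c3, c4, c5⟩ :=
        (hsum _ _ _ _ _ _ (hc _ _) (hc _ _) (hc _ _) (hc _ _) (hc _ _) (hc _ _)).mp hs
      refine Or.inl (Or.inl (Or.inl ⟨i, hi, j, hj5, ?_⟩))
      intro k hk
      interval_cases k
      · exact c0
      · exact c1
      · exact c2
      · exact c3
      · exact c4
      · exact c5
  · rintro (((⟨i, hi, j, hj5, w⟩ | ⟨j, hj, i, hi5, w⟩) | ⟨s, hs, t, ht, w⟩) | ⟨s, ⟨hs1, hs2⟩, t, ht, w⟩)
    · exact ⟨i, hi, j, by omega, Or.inr ⟨hj5,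
        (hsum _ _ _ _ _ _ (hc _ _) (hc _ _) (hc _ _) (hc _ _) (hc _ _) (hc _ _)).mpr
          ⟨w 0 (by omega), w 1 (by omega), w 2 (by omega), w 3 (by omega), w 4 (by omega), w 5 (by omega)⟩⟩⟩
    · exact ⟨i, by omega, j, hj, Or.inl (Or.inr ⟨hi5,
        (hsum _ _ _ _ _ _ (hc _ _) (hc _ _) (hc _ _) (hc _ _) (hc _ _) (hc _ _)).mpr
          ⟨w 0 (by omega), w 1 (by omega), w 2 (by omega), w 3 (by omega), w 4 (by omega), w 5 (by omega)⟩⟩)⟩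
    · exact ⟨t, by omega, s + t, by omega, Or.inl (Or.inl ⟨⟨by omega, by omega⟩,
        (hsum _ _ _ _ _ _ (hc _ _) (hc _ _) (hc _ _) (hc _ _) (hc _ _) (hc _ _)).mpr
          ⟨w 0 (by omega), w 1 (by omega), w 2 (by omega), w 3 (by omega), w 4 (by omega), w 5 (by omega)⟩⟩)⟩
    · exact ⟨s + t, by omega, t, by omega, Or.inl (Or.inl ⟨⟨by omega, by omega⟩,
        (hsum _ _ _ _ _ _ (hc _ _) (hc _ _) (hc _ _) (hc _ _) (hc _ _) (hc _ _)).mpr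
          ⟨w 0 (by omega), w 1 (by omega), w 2 (by omega), w 3 (by omega), w 4 (by omega), w 5 (by omega)⟩⟩)⟩

theorem pv_main (grid : List (List String)) : check_for_consecutive_black_squares grid = check_for_consecutive_black_squares_alt grid := by
  rw [Bool.eq_iff_iff]
  simp only [check_for_consecutive_black_squares, check_for_consecutive_black_squares_alt, List.any_eq_true, List.mem_range, Bool.or_eq_true, Bool.and_eq_true,
    decide_eq_true_eq, pvRunScan_window, List.mem_range'_1]
  exact main_abstract grid.length (pvCell (pvGrid grid)) (pvCell01 grid)

-- ===== VERDICT (by name: the statement is the Claim_ definition above) =====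
theorem check_for_consecutive_black_squares_spec : Claim_equal_check_for_consecutive_black_squares := by
  intro grid _ _
  unfold Spec_check_for_consecutive_black_squares
  exact pv_main grid
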